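-- pv_equiv track=rewrite | github.com/Xuanma0/Project-Be-your-eyes | Gateway/byes/inference/prompt_budget.py | _mode_tokens
-- ===== SOURCE A (Python) =====
-- _MODE_ALIASES = {
--     "targets": "targets",
--     "target": "targets",
--     "text": "text",
--     "boxes": "boxes",
--     "box": "boxes",
--     "points": "points",
--     "point": "points",
-- }
--
-- def _mode_tokens(mode: str) -> list[str]:
--     parts: list[str] = []
--     seen: set[str] = set()
--     for token in str(mode or "").replace(",", "_").split("_"):
--         normalized = _MODE_ALIASES.get(token.strip().lower(), "")
--         if not normalized or normalized in seen:
--             continue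
--         seen.add(normalized)
--         parts.append(normalized)
--     for token in ("targets", "text", "boxes", "points"):
--         if token not in seen:
--             parts.append(token)
--     return parts
-- ===== SOURCE B (Python) =====
-- _MODE_ALIASES = {
--     "targets": "targets",
--     "target": "targets",
--     "text": "text",
--     "boxes": "boxes",
--     "box": "boxes",
--     "points": "points",
--     "point": "points",
-- }
--
-- _MODE_DEFAULTS = ["targets", "text", "boxes", "points"]
-- _MODE_RANK = {"targets": 0, "text": 1, "boxes": 2, "points": 3}
--
--
-- def _mode_tokens(mode: str) -> list[str]:
--     # Every normalized token is one of the four defaults, so the result is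
--     # always a permutation of _MODE_DEFAULTS: tokens seen in the mode string
--     # come first, in order of first occurrence, then the unseen defaults in
--     # default order.  Record the first-occurrence index of each normalized
--     # token, then sort the defaults by that index (unseen defaults get the
--     # distinct past-the-end key n + rank, preserving the default order).
--     tokens = str(mode or "").replace(",", "_").split("_")
--     first = {}
--     for i, token in enumerate(tokens):
--         normalized = _MODE_ALIASES.get(token.strip().lower(), "")
--         if normalized and normalized not in first:
--             first[normalized] = i
--     n = len(tokens)
--     return sorted(_MODE_DEFAULTS, key=lambda t: first.get(t, n + _MODE_RANK[t]))
-- ===== Notes on version B (the rewrite author's own statement) =====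
-- stated objective: alternative
-- what changed: Instead of building the deduplicated token list with a seen-set and then a second append-missing-defaults loop, B records the first-occurrence index of each normalized token in one dict pass and returns the four fixed defaults stably sorted by that index (unseen defaults get the distinct past-the-end key n + rank, which preserves the default order).
import Mathlib
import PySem

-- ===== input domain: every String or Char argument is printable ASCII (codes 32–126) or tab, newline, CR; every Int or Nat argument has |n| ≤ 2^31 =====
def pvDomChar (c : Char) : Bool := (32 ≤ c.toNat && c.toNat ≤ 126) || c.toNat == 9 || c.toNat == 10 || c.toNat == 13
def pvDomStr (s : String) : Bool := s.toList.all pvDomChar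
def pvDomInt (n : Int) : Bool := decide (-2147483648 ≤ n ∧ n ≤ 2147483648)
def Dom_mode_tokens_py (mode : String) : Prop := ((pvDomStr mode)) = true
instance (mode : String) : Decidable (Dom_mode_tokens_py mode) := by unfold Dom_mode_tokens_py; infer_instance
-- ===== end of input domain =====

-- B replaces A's seen-set loop plus append-missing-defaults loop by one first-occurrence-index
-- dict pass followed by a stable sort of the four fixed defaults (alternative decomposition, same cost).

-- shared module constants (_MODE_ALIASES and the default token tuple/list of both sources)
def pvAliases : PySem.Dict String String :=
  PySem.Dict.ofList [("targets", "targets"), ("target", "targets"), ("text", "text"),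
    ("boxes", "boxes"), ("box", "boxes"), ("points", "points"), ("point", "points")]

def pvDefaults : List String := ["targets", "text", "boxes", "points"]

-- ===== PORT A =====
-- 'str(mode or "")' is ported as 'if mode == "" then "" else mode' (mode is a str, so 'or' only
-- replaces the empty string by itself); '.split("_")' is 'split?' with the literal non-empty
-- separator "_", where split? is always 'some', so '.getD []' is exact.
def mode_tokens_py (mode : String) : List String :=
  let st := ((PySem.Str.split? (PySem.Str.replace (if mode == "" then "" else mode) "," "_") "_").getD []).foldl
      (fun (st : List String × PySem.Set String) token =>
        let normalized := PySem.Dict.getD pvAliases (PySem.Str.lower (PySem.Str.strip token)) ""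
        if normalized == "" || PySem.Set.contains st.2 normalized then st
        else (st.1 ++ [normalized], PySem.Set.add st.2 normalized))
      ([], PySem.Set.empty)
  pvDefaults.foldl
    (fun parts token => if PySem.Set.contains st.2 token then parts else parts ++ [token]) st.1

-- ===== PORT B =====
-- Source B's _MODE_RANK dict; _MODE_RANK[t] is ported as getD with default 0 — exact, because the
-- key function is only applied to elements of pvDefaults, which are all keys of the dict.
def pvRank : PySem.Dict String Int :=
  PySem.Dict.ofList [("targets", 0), ("text", 1), ("boxes", 2), ("points", 3)]

def mode_tokens_py_alt (mode : String) : List String :=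
  let tokens := ((PySem.Str.split? (PySem.Str.replace (if mode == "" then "" else mode) "," "_") "_").getD [])
  let first := (PySem.List.enumerate tokens).foldl
      (fun (d : PySem.Dict String Int) p =>
        let normalized := PySem.Dict.getD pvAliases (PySem.Str.lower (PySem.Str.strip p.2)) ""
        if normalized != "" && !(PySem.Dict.contains d normalized) then
          PySem.Dict.insert d normalized p.1
        else d)
      PySem.Dict.empty
  let n : Int := PySem.List.len tokens
  PySem.List.sorted pvDefaults (fun t => PySem.Dict.getD first t (n + PySem.Dict.getD pvRank t 0)) false

-- ===== PRECONDITION & SPEC =====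
def Spec_mode_tokens_py (mode : String) (out : List String) : Prop := out = mode_tokens_py_alt mode
instance (mode : String) (out : List String) : Decidable (Spec_mode_tokens_py mode out) := by unfold Spec_mode_tokens_py; infer_instance

-- ===== CLAIM (what is proved, stated in full; the proofs are below) =====
def Claim_equal_mode_tokens_py : Prop := ∀ (mode : String), Dom_mode_tokens_py mode → Spec_mode_tokens_py mode (mode_tokens_py mode)

-- ===== LEMMAS AND PROOFS =====

-- the normalization applied to one raw token
def nrmTok (p : String) : String :=
  PySem.Dict.getD pvAliases (PySem.Str.lower (PySem.Str.strip p)) ""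

-- the list of parts A appends while scanning ps with seen-set s (ordered dedup of new tokens)
def ddL : List String → PySem.Set String → List String
  | [], _ => []
  | p :: ps, s =>
    if nrmTok p == "" || PySem.Set.contains s (nrmTok p) then ddL ps s
    else nrmTok p :: ddL ps (PySem.Set.add s (nrmTok p))

-- the seen-set after scanning ps starting from s
def ssL : List String → PySem.Set String → PySem.Set String
  | [], s => s
  | p :: ps, s =>
    if nrmTok p == "" || PySem.Set.contains s (nrmTok p) then ssL ps s
    else ssL ps (PySem.Set.add s (nrmTok p))

-- index of the first token of ps normalizing to t
def fI : List String → String → Option Nat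
  | [], _ => none
  | p :: ps, t => if nrmTok p = t then some 0 else (fI ps t).map (· + 1)

def rankD (t : String) : Int := PySem.Dict.getD pvRank t 0

-- B's sort key, expressed through fI
def keyN (ps : List String) (t : String) : Int :=
  match fI ps t with
  | some j => (j : Int)
  | none => (ps.length : Int) + rankD t

def fA (st : List String × PySem.Set String) (token : String) : List String × PySem.Set String :=
  if nrmTok token == "" || PySem.Set.contains st.2 (nrmTok token) then st
  else (st.1 ++ [nrmTok token], PySem.Set.add st.2 (nrmTok token))

theorem foldA_eq_fA (ps : List String) : ∀ (acc : List String) (s : PySem.Set String),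
    ps.foldl fA (acc, s) = (acc ++ ddL ps s, ssL ps s) := by
  induction ps with
  | nil => intro acc s; simp [ddL, ssL]
  | cons p ps ih =>
    intro acc s
    simp only [List.foldl_cons, ddL, ssL, fA]
    by_cases h : (nrmTok p == "" || PySem.Set.contains s (nrmTok p)) = true
    · rw [if_pos h, if_pos h, if_pos h, ih]
    · rw [if_neg h, if_neg h, if_neg h, ih]
      simp

theorem foldA_eq (ps : List String) (acc : List String) (s : PySem.Set String) :
    ps.foldl
      (fun (st : List String × PySem.Set String) token =>
        let normalized := PySem.Dict.getD pvAliases (PySem.Str.lower (PySem.Str.strip token)) ""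
        if normalized == "" || PySem.Set.contains st.2 normalized then st
        else (st.1 ++ [normalized], PySem.Set.add st.2 normalized))
      (acc, s) = (acc ++ ddL ps s, ssL ps s) := by
  have : (fun (st : List String × PySem.Set String) token =>
        let normalized := PySem.Dict.getD pvAliases (PySem.Str.lower (PySem.Str.strip token)) ""
        if normalized == "" || PySem.Set.contains st.2 normalized then st
        else (st.1 ++ [normalized], PySem.Set.add st.2 normalized)) = fA := by
    funext st token; rfl
  rw [this, foldA_eq_fA]

theorem mem_ssL (ps : List String) : ∀ (s : PySem.Set String) (t : String),
    t ∈ ssL ps s ↔ t ∈ s ∨ t ∈ ddL ps s := by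
  induction ps with
  | nil => intro s t; simp [ssL, ddL]
  | cons p ps ih =>
    intro s t
    by_cases h : nrmTok p = "" ∨ nrmTok p ∈ s
    · simp [ssL, ddL, h, ih]
    · simp only [ssL, ddL]
      rw [if_neg (by simpa using h), if_neg (by simpa using h), ih]
      simp only [PySem.Set.mem_add, List.mem_cons]
      exact or_assoc

theorem mem_ddL (ps : List String) : ∀ (s : PySem.Set String) (t : String),
    t ∈ ddL ps s ↔ t ≠ "" ∧ t ∉ s ∧ (fI ps t).isSome := by
  induction ps with
  | nil => intro s t; simp [ddL, fI]
  | cons p ps ih =>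
    intro s t
    by_cases h : nrmTok p = "" ∨ nrmTok p ∈ s
    · simp only [ddL, fI]
      rw [if_pos (by simpa using h), ih]
      by_cases hp : nrmTok p = t
      · subst hp
        simp only [if_pos rfl, Option.isSome_some]
        rcases h with h | h
        · simp [h]
        · simp [h]
      · simp [hp]
    · simp only [ddL, fI]
      rw [if_neg (by simpa using h)]
      push Not at h
      by_cases hp : nrmTok p = t
      · subst hp
        simp [h.1, h.2]
      · have hadd : t ∈ PySem.Set.add s (nrmTok p) ↔ t ∈ s := by
          rw [PySem.Set.mem_add]
          simp [Ne.symm hp]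
        simp [hp, Ne.symm hp, ih, hadd]

theorem nodup_ddL (ps : List String) : ∀ (s : PySem.Set String), (ddL ps s).Nodup := by
  induction ps with
  | nil => intro s; simp [ddL]
  | cons p ps ih =>
    intro s
    simp only [ddL]
    split
    · exact ih s
    · refine List.nodup_cons.mpr ⟨fun hmem => ?_, ih _⟩
      have := (mem_ddL ps _ _).mp hmem
      exact this.2.1 (by rw [PySem.Set.mem_add]; right; rfl)

theorem fI_lt_length {t : String} : ∀ {ps : List String} {j : Nat}, fI ps t = some j → j < ps.length := by
  intro ps
  induction ps with
  | nil => intro j h; simp [fI] at h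
  | cons p ps ih =>
    intro j h
    simp only [fI] at h
    split at h
    · cases h; simp
    · cases hf : fI ps t with
      | none => rw [hf] at h; simp at h
      | some k =>
        rw [hf] at h
        simp at h
        subst h
        simpa using Nat.succ_lt_succ (ih hf)

theorem keyN_cons_of_ne {p t : String} (ps : List String) (h : nrmTok p ≠ t) :
    keyN (p :: ps) t = keyN ps t + 1 := by
  unfold keyN
  simp only [fI, if_neg h]
  cases hf : fI ps t with
  | none =>
    simp only [Option.map_none, List.length_cons]
    push_cast
    ring
  | some j =>
    simp only [Option.map_some]
    push_cast
    ring

theorem rankD_nonneg (t : String) : 0 ≤ rankD t := by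
  unfold rankD
  have h : pvRank = PySem.Dict.mk [("targets", 0), ("text", 1), ("boxes", 2), ("points", 3)] := by decide
  rw [h]
  simp only [PySem.Dict.getD_eq_get?_getD, PySem.Dict.get?_mk_cons]
  split_ifs <;> simp [PySem.Dict.get?]

theorem keyN_nonneg (ps : List String) (t : String) : 0 ≤ keyN ps t := by
  unfold keyN
  cases hf : fI ps t with
  | some j => positivity
  | none => have := rankD_nonneg t; positivity

theorem pairwise_ddL (ps : List String) : ∀ (s : PySem.Set String),
    (ddL ps s).Pairwise (fun a b => keyN ps a < keyN ps b) := by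
  induction ps with
  | nil => intro s; simp [ddL]
  | cons p ps ih =>
    intro s
    by_cases h : nrmTok p = "" ∨ nrmTok p ∈ s
    · simp only [ddL]
      rw [if_pos (by simpa using h)]
      refine (ih s).imp_of_mem ?_
      intro a b ha hb hlt
      have hka : nrmTok p ≠ a := by
        have := (mem_ddL ps s a).mp ha
        rintro rfl
        rcases h with h | h
        · exact this.1 h
        · exact this.2.1 h
      have hkb : nrmTok p ≠ b := by
        have := (mem_ddL ps s b).mp hb
        rintro rfl
        rcases h with h | h
        · exact this.1 h
        · exact this.2.1 h
      rw [keyN_cons_of_ne ps hka, keyN_cons_of_ne ps hkb]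
      omega
    · simp only [ddL]
      rw [if_neg (by simpa using h)]
      push Not at h
      refine List.pairwise_cons.mpr ⟨?_, ?_⟩
      · intro b hb
        have hkb : nrmTok p ≠ b := by
          have := (mem_ddL ps _ b).mp hb
          rintro rfl
          exact this.2.1 (by rw [PySem.Set.mem_add]; right; rfl)
        rw [keyN_cons_of_ne ps hkb]
        have h0 : keyN (p :: ps) (nrmTok p) = 0 := by
          unfold keyN
          simp [fI]
        rw [h0]
        have := keyN_nonneg ps b
        omega
      · refine (ih _).imp_of_mem ?_
        intro a b ha hb hlt
        have hka : nrmTok p ≠ a := by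
          have := (mem_ddL ps _ a).mp ha
          rintro rfl
          exact this.2.1 (by rw [PySem.Set.mem_add]; right; rfl)
        have hkb : nrmTok p ≠ b := by
          have := (mem_ddL ps _ b).mp hb
          rintro rfl
          exact this.2.1 (by rw [PySem.Set.mem_add]; right; rfl)
        rw [keyN_cons_of_ne ps hka, keyN_cons_of_ne ps hkb]
        omega

theorem nrm_cases (p : String) : nrmTok p = "" ∨ nrmTok p ∈ pvDefaults := by
  unfold nrmTok
  generalize PySem.Str.lower (PySem.Str.strip p) = x
  have h : pvAliases = PySem.Dict.mk [("targets", "targets"), ("target", "targets"), ("text", "text"),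
    ("boxes", "boxes"), ("box", "boxes"), ("points", "points"), ("point", "points")] := by decide
  rw [h]
  simp only [PySem.Dict.getD_eq_get?_getD, PySem.Dict.get?_mk_cons, pvDefaults]
  split_ifs <;> simp [PySem.Dict.get?]

theorem mem_defaults_of_mem_ddL {ps : List String} {s : PySem.Set String} {t : String}
    (h : t ∈ ddL ps s) : t ∈ pvDefaults := by
  induction ps generalizing s with
  | nil => simp [ddL] at h
  | cons p ps ih =>
    simp only [ddL] at h
    by_cases hg : (nrmTok p == "" || PySem.Set.contains s (nrmTok p)) = true
    · rw [if_pos hg] at h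
      exact ih h
    · rw [if_neg hg] at h
      rcases List.mem_cons.mp h with h' | h
      · rcases nrm_cases p with hc | hc
        · exact absurd (by simp [hc]) hg
        · rwa [h']
      · exact ih h

def fB (d : PySem.Dict String Int) (p : Int × String) : PySem.Dict String Int :=
  if nrmTok p.2 != "" && !(PySem.Dict.contains d (nrmTok p.2)) then
    PySem.Dict.insert d (nrmTok p.2) p.1
  else d

theorem foldB_get? (ps : List String) : ∀ (i : Int) (d : PySem.Dict String Int) (t : String),
    t ≠ "" →
    (((PySem.List.enumerate ps i).foldl fB d).get? t)
      = (d.get? t).or ((fI ps t).map (fun j => i + (j : Int))) := by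
  induction ps with
  | nil => intro i d t ht; simp [PySem.List.enumerate_nil, fI]
  | cons p ps ih =>
    intro i d t ht
    rw [PySem.List.enumerate_cons, List.foldl_cons]
    rw [ih (i + 1) _ t ht]
    simp only [fI]
    by_cases hp : nrmTok p = t
    · rw [if_pos hp]
      by_cases hc : PySem.Dict.contains d t = true
      · have hfb : fB d (i, p) = d := by
          unfold fB
          rw [show (i, p).2 = p from rfl, hp]
          simp [hc]
        rw [hfb]
        have hsome : (d.get? t).isSome := by
          rw [← PySem.Dict.contains_eq_isSome_get?]; exact hc
        cases hg : d.get? t with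
        | none => rw [hg] at hsome; simp at hsome
        | some v => simp
      · have hfb : fB d (i, p) = PySem.Dict.insert d t i := by
          unfold fB
          rw [show (i, p).2 = p from rfl, hp, show (i, p).1 = i from rfl]
          simp [hc, ht]
        rw [hfb]
        have hnone : d.get? t = none := by
          rw [PySem.Dict.get?_eq_none_iff_contains]
          simpa using hc
        rw [PySem.Dict.get?_insert_self, hnone]
        simp
    · rw [if_neg hp]
      have hfb : (fB d (i, p)).get? t = d.get? t := by
        unfold fB
        split
        · refine PySem.Dict.get?_insert_of_ne _ _ ?_
          intro hh
          exact hp (by rw [hh])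
        · rfl
      rw [hfb]
      cases hf : fI ps t with
      | none => simp
      | some j =>
        simp only [Option.map_some]
        cases hg : d.get? t <;> simp [Option.or] <;> push_cast <;> ring

theorem mem_defaults_ne_empty {t : String} (h : t ∈ pvDefaults) : t ≠ "" := by
  have h' : t = "targets" ∨ t = "text" ∨ t = "boxes" ∨ t = "points" := by
    simpa [pvDefaults] using h
  rcases h' with rfl | rfl | rfl | rfl <;> decide

theorem rank_pairwise : pvDefaults.Pairwise (fun a b => rankD a < rankD b) := by decide

theorem nodup_defaults : pvDefaults.Nodup := by decide

theorem second_loop_eq (S : PySem.Set String) (acc : List String) :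
    pvDefaults.foldl (fun parts token => if PySem.Set.contains S token then parts else parts ++ [token]) acc
      = acc ++ pvDefaults.filter (fun t => !(PySem.Set.contains S t)) := by
  have hfun : (fun (parts : List String) token => if PySem.Set.contains S token then parts else parts ++ [token])
      = (fun parts token => if (!(PySem.Set.contains S token)) = true then parts ++ [token] else parts) := by
    funext parts token
    cases PySem.Set.contains S token <;> simp
  rw [hfun, PySem.List.foldl_append_if_eq_filter]

theorem key_missing {ps : List String} {t : String} (ht : t ∈ pvDefaults)
    (hnot : t ∉ ddL ps PySem.Set.empty) : keyN ps t = (ps.length : Int) + rankD t := by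
  have hne := mem_defaults_ne_empty ht
  have : ¬ (fI ps t).isSome := by
    intro hs
    exact hnot ((mem_ddL ps PySem.Set.empty t).mpr ⟨hne, by simp [PySem.Set.empty], hs⟩)
  unfold keyN
  cases hf : fI ps t with
  | some j => rw [hf] at this; simp at this
  | none => rfl

theorem key_in {ps : List String} {t : String} (hmem : t ∈ ddL ps PySem.Set.empty) :
    keyN ps t < (ps.length : Int) := by
  have hs := ((mem_ddL ps PySem.Set.empty t).mp hmem).2.2
  cases hf : fI ps t with
  | some j =>
    have hk : keyN ps t = (j : Int) := by simp [keyN, hf]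
    rw [hk]
    exact_mod_cast fI_lt_length hf
  | none => rw [hf] at hs; simp at hs

theorem result_perm (ps : List String) :
    (ddL ps PySem.Set.empty ++
      pvDefaults.filter (fun t => !(PySem.Set.contains (ssL ps PySem.Set.empty) t))).Perm pvDefaults := by
  have hm : ∀ t, PySem.Set.contains (ssL ps PySem.Set.empty) t = true ↔ t ∈ ddL ps PySem.Set.empty := by
    intro t
    rw [PySem.Set.contains_iff, mem_ssL]
    simp [PySem.Set.empty]
  have h1 : (ddL ps PySem.Set.empty).Perm
      (pvDefaults.filter (fun t => PySem.Set.contains (ssL ps PySem.Set.empty) t)) := by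
    rw [List.perm_ext_iff_of_nodup (nodup_ddL ps _) (nodup_defaults.filter _)]
    intro a
    rw [List.mem_filter]
    constructor
    · intro ha
      exact ⟨mem_defaults_of_mem_ddL ha, (hm a).mpr ha⟩
    · intro ⟨_, ha⟩
      exact (hm a).mp ha
  exact (h1.append_right _).trans (List.filter_append_perm _ _)

theorem result_pairwise (ps : List String) :
    (ddL ps PySem.Set.empty ++
      pvDefaults.filter (fun t => !(PySem.Set.contains (ssL ps PySem.Set.empty) t))).Pairwise
      (fun a b => keyN ps a < keyN ps b) := by
  have hm : ∀ t, PySem.Set.contains (ssL ps PySem.Set.empty) t = true ↔ t ∈ ddL ps PySem.Set.empty := by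
    intro t
    rw [PySem.Set.contains_iff, mem_ssL]
    simp [PySem.Set.empty]
  rw [List.pairwise_append]
  refine ⟨pairwise_ddL ps _, ?_, ?_⟩
  · refine (rank_pairwise.filter _).imp_of_mem ?_
    intro a b ha hb hlt
    rw [List.mem_filter] at ha hb
    have hna : a ∉ ddL ps PySem.Set.empty := by
      intro hmem
      have h2 := ha.2
      rw [(hm a).mpr hmem] at h2
      simp at h2
    have hnb : b ∉ ddL ps PySem.Set.empty := by
      intro hmem
      have h2 := hb.2
      rw [(hm b).mpr hmem] at h2
      simp at h2
    rw [key_missing ha.1 hna, key_missing hb.1 hnb]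
    omega
  · intro a ha b hb
    rw [List.mem_filter] at hb
    have hnb : b ∉ ddL ps PySem.Set.empty := by
      intro hmem
      have h2 := hb.2
      rw [(hm b).mpr hmem] at h2
      simp at h2
    have h1 := key_in ha
    rw [key_missing hb.1 hnb]
    have := rankD_nonneg b
    omega

theorem key_agree (ps : List String) (t : String) (ht : t ≠ "") :
    PySem.Dict.getD
      ((PySem.List.enumerate ps).foldl
        (fun (d : PySem.Dict String Int) p =>
          let normalized := PySem.Dict.getD pvAliases (PySem.Str.lower (PySem.Str.strip p.2)) ""
          if normalized != "" && !(PySem.Dict.contains d normalized) then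
            PySem.Dict.insert d normalized p.1
          else d)
        PySem.Dict.empty) t (PySem.List.len ps + PySem.Dict.getD pvRank t 0)
      = keyN ps t := by
  have hfun : (fun (d : PySem.Dict String Int) p =>
        let normalized := PySem.Dict.getD pvAliases (PySem.Str.lower (PySem.Str.strip p.2)) ""
        if normalized != "" && !(PySem.Dict.contains d normalized) then
          PySem.Dict.insert d normalized p.1
        else d) = fB := by
    funext d p; rfl
  rw [hfun, PySem.Dict.getD_eq_get?_getD, foldB_get? ps 0 PySem.Dict.empty t ht]
  cases hf : fI ps t with
  | some j =>
    have : PySem.Dict.get? (PySem.Dict.empty : PySem.Dict String Int) t = none := PySem.Dict.get?_empty t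
    rw [this]
    simp [keyN, hf, Option.or]
  | none =>
    have : PySem.Dict.get? (PySem.Dict.empty : PySem.Dict String Int) t = none := PySem.Dict.get?_empty t
    rw [this]
    simp [keyN, hf, Option.or, rankD, PySem.List.len_eq]

theorem main_eq (ps : List String) :
    PySem.List.sorted pvDefaults
      (fun t => PySem.Dict.getD
        ((PySem.List.enumerate ps).foldl
          (fun (d : PySem.Dict String Int) p =>
            let normalized := PySem.Dict.getD pvAliases (PySem.Str.lower (PySem.Str.strip p.2)) ""
            if normalized != "" && !(PySem.Dict.contains d normalized) then
              PySem.Dict.insert d normalized p.1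
            else d)
          PySem.Dict.empty) t (PySem.List.len ps + PySem.Dict.getD pvRank t 0)) false
      = ddL ps PySem.Set.empty ++
        pvDefaults.filter (fun t => !(PySem.Set.contains (ssL ps PySem.Set.empty) t)) := by
  apply PySem.List.sorted_eq_of_perm_of_pairwise_lt
  · exact result_perm ps
  · refine (result_pairwise ps).imp_of_mem ?_
    intro a b ha hb hlt
    have hL : ∀ x, x ∈ (ddL ps PySem.Set.empty ++
        pvDefaults.filter (fun t => !(PySem.Set.contains (ssL ps PySem.Set.empty) t))) → x ∈ pvDefaults := by
      intro x hx
      rcases List.mem_append.mp hx with hx | hx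
      · exact mem_defaults_of_mem_ddL hx
      · exact (List.mem_filter.mp hx).1
    rw [key_agree ps a (mem_defaults_ne_empty (hL a ha)),
        key_agree ps b (mem_defaults_ne_empty (hL b hb))]
    exact hlt


-- ===== VERDICT (by name: the statement is the Claim_ definition above) =====
theorem mode_tokens_py_spec : Claim_equal_mode_tokens_py := by
  intro mode _
  unfold Spec_mode_tokens_py
  simp only [mode_tokens_py, mode_tokens_py_alt]
  rw [foldA_eq, second_loop_eq, main_eq]
  simp
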